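-- pv_equiv track=rewrite | github.com/Yongju-Jeong/CwC | NeuronA/2주차/주식가격.py | solution
-- ===== SOURCE A (Python) =====
-- from collections import deque
--
-- def solution(prices: list) -> list:
--     prices_deq = deque(prices)
--     answer = []
--
--     while prices_deq:
--         cmp_value = prices_deq.popleft()
--
--         low_idxs = next((v for v in prices_deq if cmp_value > v), None)
--         if low_idxs is not None:
--             answer.append(prices_deq.index(low_idxs)+1)
--         else:
--             answer.append(len(prices_deq))
--
--     return answer
-- ===== SOURCE B (Python) =====
-- def solution(prices: list) -> list:
--     n = len(prices)
--     answer = [0] * n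
--     stack = []  # pairs (index, price), prices non-increasing from top of stack downward... (top = last)
--     for i, p in enumerate(prices):
--         while stack and p < stack[-1][1]:
--             j, _ = stack.pop()
--             answer[j] = i - j
--         stack.append((i, p))
--     for j, _ in stack:
--         answer[j] = n - 1 - j
--     return answer
-- ===== Notes on version B (the rewrite author's own statement) =====
-- stated objective: faster
-- what changed: replaced A's per-element rescan of the whole remaining deque (find first smaller value, then .index it) by a single pass with a monotonic stack of (index, price) pairs that resolves each position exactly once
import Mathlib
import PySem

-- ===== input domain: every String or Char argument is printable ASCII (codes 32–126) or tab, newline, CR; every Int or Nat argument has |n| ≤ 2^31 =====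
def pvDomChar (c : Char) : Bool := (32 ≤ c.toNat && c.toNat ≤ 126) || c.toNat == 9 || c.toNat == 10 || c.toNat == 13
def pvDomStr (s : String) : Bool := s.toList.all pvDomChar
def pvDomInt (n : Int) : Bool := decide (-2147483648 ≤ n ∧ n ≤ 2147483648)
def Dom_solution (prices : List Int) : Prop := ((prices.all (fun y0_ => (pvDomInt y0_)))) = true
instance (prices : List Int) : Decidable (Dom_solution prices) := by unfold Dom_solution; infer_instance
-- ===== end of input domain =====

-- B replaces A's per-element rescan of the whole remaining deque by a one-pass
-- monotonic stack of (index, price) pairs (objective: faster).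

-- ===== PORT A =====
-- while prices_deq: pop the head, scan the rest for the first smaller value
-- (cmp_value > v), then .index it (+1); else append the remaining length.
def solution (prices : List Int) : List Int :=
  match prices with
  | [] => []
  | x :: rest =>
    (match rest.find? (fun v => decide (v < x)) with
     | some v => ((PySem.List.index? rest v).getD 0 : Int) + 1
     | none => (rest.length : Int)) :: solution rest

-- ===== PORT B =====
-- 'for i, p in enumerate(prices)':  enumFrom 0 prices = list(enumerate(prices))
def enumFrom (i : Nat) (xs : List Int) : List (Nat × Int) :=
  match xs with
  | [] => []
  | x :: xs => (i, x) :: enumFrom (i + 1) xs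

-- the inner 'while stack and p < stack[-1][1]' loop (stack head = top of stack)
def popLoop (i : Nat) (p : Int) (ans : List Int) (st : List (Nat × Int)) :
    List Int × List (Nat × Int) :=
  match st with
  | [] => (ans, [])
  | (j, v) :: st' =>
    if p < v then popLoop i p (ans.set j ((i : Int) - (j : Int))) st'
    else (ans, (j, v) :: st')

-- the outer 'for i, p in enumerate(prices)' loop
def mainLoop (es : List (Nat × Int)) (ans : List Int) (st : List (Nat × Int)) :
    List Int × List (Nat × Int) :=
  match es with
  | [] => (ans, st)
  | (i, p) :: es' =>
    let r := popLoop i p ans st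
    mainLoop es' r.1 ((i, p) :: r.2)

-- the trailing 'for j, _ in stack: answer[j] = n - 1 - j' loop
def finishStack (n : Nat) (ans : List Int) (st : List (Nat × Int)) : List Int :=
  st.foldl (fun a jp => a.set jp.1 ((n : Int) - 1 - (jp.1 : Int))) ans

def solution_alt (prices : List Int) : List Int :=
  let n := prices.length
  let r := mainLoop (enumFrom 0 prices) (List.replicate n (0 : Int)) []
  finishStack n r.1 r.2

-- ===== PRECONDITION & SPEC =====
def Spec_solution (prices : List Int) (out : List Int) : Prop := out = solution_alt prices
instance (prices : List Int) (out : List Int) : Decidable (Spec_solution prices out) := by unfold Spec_solution; infer_instance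

-- ===== CLAIM (what is proved, stated in full; the proofs are below) =====
def Claim_equal_solution : Prop := ∀ (prices : List Int), Dom_solution prices → Spec_solution prices (solution prices)

-- ===== LEMMAS AND PROOFS =====

-- "next smaller distance": the value both programs record for a head x with tail rest
def nsd (x : Int) (rest : List Int) : Int :=
  match rest.findIdx? (fun v => decide (v < x)) with
  | some k => (k : Int) + 1
  | none => (rest.length : Int)

def spec (xs : List Int) : List Int :=
  match xs with
  | [] => []
  | x :: rest => nsd x rest :: spec rest

-- the final value written for a stack entry (index m, price v) when the
-- still-unread suffix is S starting at position i, with total length n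
def entryVal (n i m : Nat) (v : Int) (S : List Int) : Int :=
  match S.findIdx? (fun w => decide (w < v)) with
  | some k => ((i + k : Nat) : Int) - (m : Int)
  | none => (n : Int) - 1 - (m : Int)

def run (i : Nat) (S : List Int) (ans : List Int) (st : List (Nat × Int)) : List Int :=
  finishStack (i + S.length) (mainLoop (enumFrom i S) ans st).1 (mainLoop (enumFrom i S) ans st).2

-- ---- A = spec ----

theorem index?_of_find? (p : Int → Bool) (xs : List Int) (v : Int)
    (h : xs.find? p = some v) : PySem.List.index? xs v = xs.findIdx? p := by
  induction xs with
  | nil => simp at h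
  | cons a t ih =>
    by_cases hp : p a = true
    · simp [hp] at h
      subst h
      rw [PySem.List.index?_cons_self, List.findIdx?_cons, if_pos hp]
    · simp [hp] at h
      have hpv : p v = true := List.find?_some h
      have hne : a ≠ v := by rintro rfl; exact hp hpv
      rw [PySem.List.index?_cons_of_ne t hne, List.findIdx?_cons, if_neg hp, ih h]

theorem solution_eq_spec (xs : List Int) : solution xs = spec xs := by
  induction xs with
  | nil => rfl
  | cons x rest ih =>
    rw [solution, spec, ih]
    congr 1
    unfold nsd
    cases hf : rest.find? (fun v => decide (v < x)) with
    | some v =>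
      have hidx : List.idxOf? v rest = rest.findIdx? (fun v => decide (v < x)) := by
        rw [← PySem.List.index?_eq_idxOf?]
        exact index?_of_find? _ _ _ hf
      cases hk : rest.findIdx? (fun v => decide (v < x)) with
      | some k => simp [hidx, hk]
      | none =>
        rw [List.findIdx?_eq_none_iff] at hk
        have hpv := List.find?_some (p := fun v => decide (v < x)) hf
        have := hk v (List.mem_of_find?_eq_some hf)
        simp [hpv] at this
    | none =>
      have hk : rest.findIdx? (fun v => decide (v < x)) = none := by
        rw [List.findIdx?_eq_none_iff]
        intro w hw
        simpa using List.find?_eq_none.mp hf w hw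
      simp [hk]

-- ---- lookup helpers (keys are Nat) ----

theorem lookup_cons_self {β : Type} (k : Nat) (b : β) (t : List (Nat × β)) :
    ((k, b) :: t).lookup k = some b := by
  simp

theorem lookup_cons_ne {β : Type} (k : Nat) (b : β) (t : List (Nat × β)) (m : Nat)
    (h : m ≠ k) : ((k, b) :: t).lookup m = t.lookup m := by
  have hb : (m == k) = false := by simp [h]
  simp [List.lookup_cons, hb]

theorem lookup_mem {β : Type} (st : List (Nat × β)) (m : Nat) (v : β)
    (h : st.lookup m = some v) : (m, v) ∈ st := by
  induction st with
  | nil => simp [List.lookup] at h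
  | cons a t ih =>
    obtain ⟨k, b⟩ := a
    by_cases hm : m = k
    · subst hm
      rw [lookup_cons_self] at h
      cases h
      simp
    · rw [lookup_cons_ne _ _ _ _ hm] at h
      simp [ih h]

theorem lookup_eq_none_iff {β : Type} (st : List (Nat × β)) (m : Nat) :
    st.lookup m = none ↔ ∀ jv ∈ st, jv.1 ≠ m := by
  induction st with
  | nil => simp [List.lookup]
  | cons a t ih =>
    obtain ⟨k, b⟩ := a
    by_cases hm : m = k
    · subst hm
      rw [lookup_cons_self]
      simp
    · rw [lookup_cons_ne _ _ _ _ hm, ih]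
      constructor
      · intro h jv hjv
        rcases List.mem_cons.mp hjv with rfl | hjv
        · simpa using Ne.symm hm
        · exact h jv hjv
      · intro h jv hjv
        exact h jv (by simp [hjv])

theorem key_unique {β : Type} (st : List (Nat × β))
    (hnd : st.Pairwise (fun a b => a.1 ≠ b.1)) {a b : Nat × β}
    (ha : a ∈ st) (hb : b ∈ st) (hk : a.1 = b.1) : a = b := by
  induction st with
  | nil => simp at ha
  | cons x t ih =>
    rcases List.mem_cons.mp ha with rfl | ha' <;> rcases List.mem_cons.mp hb with rfl | hb'
    · rfl
    · exact absurd hk ((List.pairwise_cons.mp hnd).1 b hb')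
    · exact absurd hk.symm ((List.pairwise_cons.mp hnd).1 a ha')
    · exact ih (List.pairwise_cons.mp hnd).2 ha' hb'

-- every entry surviving the pop has value ≤ p (stack values non-increasing)
theorem dropWhile_val_le (p : Int) (st : List (Nat × Int))
    (h3 : st.Pairwise (fun a b => b.2 ≤ a.2)) :
    ∀ b ∈ st.dropWhile (fun jv => decide (p < jv.2)), b.2 ≤ p := by
  induction st with
  | nil => simp
  | cons a t ih =>
    by_cases hq : p < a.2
    · simpa [List.dropWhile_cons, hq] using ih (List.pairwise_cons.mp h3).2
    · intro b hb
      rw [List.dropWhile_cons, if_neg (by simpa using hq)] at hb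
      rcases List.mem_cons.mp hb with rfl | hb
      · omega
      · exact le_trans ((List.pairwise_cons.mp h3).1 b hb) (by omega)

theorem lookup_takeWhile_of_lt (p : Int) (st : List (Nat × Int)) (m : Nat) (v : Int)
    (h3 : st.Pairwise (fun a b => b.2 ≤ a.2))
    (h : st.lookup m = some v) (hv : p < v) :
    (st.takeWhile (fun jv => decide (p < jv.2))).lookup m = some v := by
  induction st with
  | nil => simp [List.lookup] at h
  | cons a t ih =>
    obtain ⟨k, b⟩ := a
    by_cases hm : m = k
    · subst hm
      rw [lookup_cons_self] at h
      cases h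
      rw [List.takeWhile_cons, if_pos (by simpa using hv), lookup_cons_self]
    · rw [lookup_cons_ne _ _ _ _ hm] at h
      have hbv : v ≤ b := by
        have := (List.pairwise_cons.mp h3).1 (m, v) (lookup_mem t m v h)
        simpa using this
      rw [List.takeWhile_cons, if_pos (by simp; omega), lookup_cons_ne _ _ _ _ hm]
      exact ih (List.pairwise_cons.mp h3).2 h

theorem lookup_dropWhile_of_ge (p : Int) (st : List (Nat × Int)) (m : Nat) (v : Int)
    (h : st.lookup m = some v) (hv : ¬ p < v) :
    (st.dropWhile (fun jv => decide (p < jv.2))).lookup m = some v := by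
  induction st with
  | nil => simp [List.lookup] at h
  | cons a t ih =>
    obtain ⟨k, b⟩ := a
    by_cases hm : m = k
    · subst hm
      rw [lookup_cons_self] at h
      cases h
      rw [List.dropWhile_cons, if_neg (by simpa using hv), lookup_cons_self]
    · rw [lookup_cons_ne _ _ _ _ hm] at h
      by_cases hq : p < b
      · rw [List.dropWhile_cons, if_pos (by simpa using hq)]
        exact ih h
      · rw [List.dropWhile_cons, if_neg (by simpa using hq), lookup_cons_ne _ _ _ _ hm]
        exact h

-- ---- popLoop characterisation ----

theorem popLoop_snd (i : Nat) (p : Int) (ans : List Int) (st : List (Nat × Int)) :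
    (popLoop i p ans st).2 = st.dropWhile (fun jv => decide (p < jv.2)) := by
  induction st generalizing ans with
  | nil => rfl
  | cons a t ih =>
    obtain ⟨j, v⟩ := a
    by_cases hq : p < v
    · simpa [popLoop, hq, List.dropWhile_cons] using ih _
    · simp [popLoop, hq]

theorem popLoop_fst_length (i : Nat) (p : Int) (ans : List Int) (st : List (Nat × Int)) :
    (popLoop i p ans st).1.length = ans.length := by
  induction st generalizing ans with
  | nil => rfl
  | cons a t ih =>
    obtain ⟨j, v⟩ := a
    by_cases hq : p < v
    · rw [popLoop, if_pos hq, ih, List.length_set]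
    · rw [popLoop, if_neg hq]

theorem popLoop_fst_get (i : Nat) (p : Int) (ans : List Int) (st : List (Nat × Int)) (m : Nat)
    (h2 : st.Pairwise (fun a b => b.1 < a.1))
    (hlen : ∀ jv ∈ st, jv.1 < ans.length) :
    (popLoop i p ans st).1[m]? =
      match (st.takeWhile (fun jv => decide (p < jv.2))).lookup m with
      | some _ => some ((i : Int) - (m : Int))
      | none => ans[m]? := by
  induction st generalizing ans with
  | nil => rfl
  | cons a t ih =>
    obtain ⟨j, v⟩ := a
    by_cases hq : p < v
    · rw [popLoop, if_pos hq, List.takeWhile_cons, if_pos (by simpa using hq)]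
      rw [ih _ (List.pairwise_cons.mp h2).2 (fun jv hjv => by
        rw [List.length_set]; exact hlen jv (by simp [hjv]))]
      by_cases hm : m = j
      · subst hm
        have hnone : (t.takeWhile (fun jv => decide (p < jv.2))).lookup m = none := by
          rw [lookup_eq_none_iff]
          intro jv hjv
          have := (List.pairwise_cons.mp h2).1 jv ((List.takeWhile_sublist _).subset hjv)
          omega
        have hj : m < ans.length := hlen (m, v) (by simp)
        rw [lookup_cons_self, hnone, List.getElem?_set_self hj]
      · rw [lookup_cons_ne _ _ _ _ hm]
        cases (t.takeWhile (fun jv => decide (p < jv.2))).lookup m with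
        | some w => simp
        | none => simp [List.getElem?_set_ne (by omega : j ≠ m)]
    · rw [popLoop, if_neg hq, List.takeWhile_cons, if_neg (by simpa using hq)]
      rfl

-- ---- finishing loop characterisation ----

theorem finishStack_get (n : Nat) (st : List (Nat × Int)) (ans : List Int) (m : Nat)
    (hlen : ∀ jv ∈ st, jv.1 < ans.length) :
    (finishStack n ans st)[m]? =
      match st.lookup m with
      | some _ => some ((n : Int) - 1 - (m : Int))
      | none => ans[m]? := by
  induction st generalizing ans with
  | nil => rfl
  | cons a t ih =>
    obtain ⟨j, v⟩ := a
    rw [show finishStack n ans ((j, v) :: t)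
        = finishStack n (ans.set j ((n : Int) - 1 - (j : Int))) t from rfl]
    rw [ih _ (fun jv hjv => by rw [List.length_set]; exact hlen jv (by simp [hjv]))]
    by_cases hm : m = j
    · subst hm
      cases hl : t.lookup m with
      | some w => rw [lookup_cons_self]
      | none =>
        have hj : m < ans.length := hlen (m, v) (by simp)
        rw [lookup_cons_self, List.getElem?_set_self hj]
    · rw [lookup_cons_ne _ _ _ _ hm]
      cases t.lookup m with
      | some w => rfl
      | none => simp [List.getElem?_set_ne (by omega : j ≠ m)]

-- ---- the main invariant of B's single pass ----

theorem run_get (S : List Int) : ∀ (i : Nat) (ans : List Int) (st : List (Nat × Int)) (m : Nat),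
    (∀ jv ∈ st, jv.1 < i) →
    st.Pairwise (fun a b => b.1 < a.1) →
    st.Pairwise (fun a b => b.2 ≤ a.2) →
    ans.length = i + S.length →
    (run i S ans st)[m]? =
      match st.lookup m with
      | some v => some (entryVal (i + S.length) i m v S)
      | none =>
        if i ≤ m ∧ m < i + S.length
        then some (nsd (S[m - i]?.getD 0) (S.drop (m - i + 1)))
        else ans[m]? := by
  induction S with
  | nil =>
    intro i ans st m h1 h2 h3 h4
    rw [show run i [] ans st = finishStack (i + 0) ans st from rfl]
    rw [finishStack_get _ _ _ _ (fun jv hjv => by rw [h4]; simpa using h1 jv hjv)]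
    cases st.lookup m with
    | some v => simp [entryVal]
    | none =>
      have hcond : ¬ (i ≤ m ∧ m < i + ([] : List Int).length) := by
        simp only [List.length_nil, Nat.add_zero]
        omega
      rw [if_neg hcond]
  | cons p S' ih =>
    intro i ans st m h1 h2 h3 h4
    have hn : i + (p :: S').length = (i + 1) + S'.length := by simp; omega
    have hrun : run i (p :: S') ans st
        = run (i + 1) S' (popLoop i p ans st).1 ((i, p) :: (popLoop i p ans st).2) := by
      simp only [run, enumFrom, mainLoop, hn]
    rw [hrun]
    set ans1 := (popLoop i p ans st).1 with hans1
    set st1 := (popLoop i p ans st).2 with hst1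
    have hdw : st1 = st.dropWhile (fun jv => decide (p < jv.2)) := popLoop_snd _ _ _ _
    have hsub : st1.Sublist st := hdw ▸ List.dropWhile_sublist _
    have hnd : st.Pairwise (fun a b => a.1 ≠ b.1) := h2.imp (fun hab => by omega)
    have hmem1 : ∀ jv ∈ st1, jv.1 < i := fun jv hjv => h1 jv (hsub.subset hjv)
    have h1' : ∀ jv ∈ (i, p) :: st1, jv.1 < i + 1 := by
      intro jv hjv
      rcases List.mem_cons.mp hjv with rfl | hjv
      · omega
      · have := hmem1 jv hjv; omega
    have h2' : ((i, p) :: st1).Pairwise (fun a b => b.1 < a.1) :=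
      List.Pairwise.cons (fun b hb => hmem1 b hb) (h2.sublist hsub)
    have h3' : ((i, p) :: st1).Pairwise (fun a b => b.2 ≤ a.2) :=
      List.Pairwise.cons (fun b hb => dropWhile_val_le p st h3 b (hdw ▸ hb))
        (h3.sublist hsub)
    have h4' : ans1.length = (i + 1) + S'.length := by
      rw [hans1, popLoop_fst_length, h4, hn]
    rw [ih (i + 1) ans1 ((i, p) :: st1) m h1' h2' h3' h4']
    have hpop := popLoop_fst_get i p ans st m h2
      (fun jv hjv => by rw [h4]; have := h1 jv hjv; simp; omega)
    cases hl : st.lookup m with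
    | some v =>
      have hmlt : m < i := h1 _ (lookup_mem st m v hl)
      rw [lookup_cons_ne _ _ _ _ (by omega : m ≠ i)]
      by_cases hv : p < v
      · -- the entry is popped now: its answer is written by popLoop, never touched again
        have htw := lookup_takeWhile_of_lt p st m v h3 hl hv
        have hnone1 : st1.lookup m = none := by
          rw [lookup_eq_none_iff]
          intro jv hjv hjm
          have hjst : jv ∈ st := hsub.subset hjv
          have htwmem : (m, v) ∈ st := (List.takeWhile_sublist _).subset (lookup_mem _ _ _ htw)
          have hjeq : jv = (m, v) := key_unique st hnd hjst htwmem hjm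
          have hle := dropWhile_val_le p st h3 jv (hdw ▸ hjv)
          rw [hjeq] at hle
          simp at hle
          omega
        rw [hnone1, if_neg (by omega), hans1, hpop, htw]
        have hfind : (p :: S').findIdx? (fun w => decide (w < v)) = some 0 := by
          rw [List.findIdx?_cons, if_pos (by simpa using hv)]
        simp only [entryVal, hfind]
        norm_num
      · -- the entry survives the pop
        have hd2 : st1.lookup m = some v := hdw ▸ lookup_dropWhile_of_ge p st m v hl hv
        rw [hd2]
        have hfind : (p :: S').findIdx? (fun w => decide (w < v))
            = (S'.findIdx? (fun w => decide (w < v))).map (· + 1) := by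
          rw [List.findIdx?_cons, if_neg (by simpa using hv)]
        cases hk : S'.findIdx? (fun w => decide (w < v)) with
        | some k =>
          have hc : (p :: S').findIdx? (fun w => decide (w < v)) = some (k + 1) := by
            rw [hfind, hk]; rfl
          simp only [entryVal, hc, hk]
          congr 1
          push_cast
          ring
        | none =>
          have hc : (p :: S').findIdx? (fun w => decide (w < v)) = none := by
            rw [hfind, hk]; rfl
          simp only [entryVal, hc, hk, List.length_cons]
          congr 1
          push_cast
          ring
    | none =>
      have hnotin : ∀ jv ∈ st, jv.1 ≠ m := (lookup_eq_none_iff st m).mp hl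
      have htw : (st.takeWhile (fun jv => decide (p < jv.2))).lookup m = none := by
        rw [lookup_eq_none_iff]
        exact fun jv hjv => hnotin jv ((List.takeWhile_sublist _).subset hjv)
      have hd : st1.lookup m = none := by
        rw [lookup_eq_none_iff]
        exact fun jv hjv => hnotin jv (hsub.subset hjv)
      by_cases hmi : m = i
      · subst hmi
        simp only [lookup_cons_self]
        have hcond : m ≤ m ∧ m < m + (p :: S').length := by
          refine ⟨le_refl m, ?_⟩
          simp only [List.length_cons]
          omega
        rw [if_pos hcond]
        have e0 : (p :: S')[m - m]?.getD 0 = p := by simp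
        have e1 : (p :: S').drop (m - m + 1) = S' := by simp
        rw [e0, e1]
        cases hk : S'.findIdx? (fun w => decide (w < p)) with
        | some k =>
          simp only [entryVal, nsd, hk]
          congr 1
          push_cast
          ring
        | none =>
          simp only [entryVal, nsd, hk]
          congr 1
          push_cast
          ring
      · rw [lookup_cons_ne _ _ _ _ hmi, hd]
        by_cases hr : i ≤ m ∧ m < i + (p :: S').length
        · have hmge : i + 1 ≤ m := by omega
          have hr2 : m < (i + 1) + S'.length := by
            have := hr.2
            simp only [List.length_cons] at this
            omega
          rw [if_pos ⟨hmge, hr2⟩, if_pos hr]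
          have e1 : m - i = (m - (i + 1)) + 1 := by omega
          rw [e1, List.getElem?_cons_succ, List.drop_succ_cons]
        · have hr' : ¬ ((i + 1) ≤ m ∧ m < (i + 1) + S'.length) := by
            intro hc
            apply hr
            refine ⟨by omega, ?_⟩
            simp only [List.length_cons]
            omega
          rw [if_neg hr', if_neg hr, hans1, hpop, htw]

-- ---- assembling both sides ----

theorem spec_get (xs : List Int) (m : Nat) :
    (spec xs)[m]? =
      if m < xs.length then some (nsd (xs[m]?.getD 0) (xs.drop (m + 1))) else none := by
  induction xs generalizing m with
  | nil => simp [spec]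
  | cons x rest ih =>
    cases m with
    | zero => simp [spec]
    | succ k =>
      rw [show spec (x :: rest) = nsd x rest :: spec rest from rfl]
      rw [List.getElem?_cons_succ, ih]
      by_cases hk : k < rest.length
      · rw [if_pos hk, if_pos (by simp; omega), List.getElem?_cons_succ, List.drop_succ_cons]
      · rw [if_neg hk, if_neg (by simp; omega)]

theorem alt_eq_spec (xs : List Int) : solution_alt xs = spec xs := by
  apply List.ext_getElem?
  intro m
  have halt : solution_alt xs = run 0 xs (List.replicate xs.length 0) [] := by
    simp [solution_alt, run]
  rw [halt, run_get xs 0 (List.replicate xs.length 0) [] m (by simp) (by simp) (by simp)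
    (by simp), spec_get]
  rw [show ([] : List (Nat × Int)).lookup m = none from rfl]
  by_cases hm : m < xs.length
  · rw [if_pos (by omega), if_pos hm]
    simp
  · rw [if_neg (by omega), if_neg hm]
    exact List.getElem?_eq_none (by simpa using hm)

-- ===== VERDICT (by name: the statement is the Claim_ definition above) =====
theorem solution_spec : Claim_equal_solution := by
  intro prices _
  unfold Spec_solution
  rw [solution_eq_spec, alt_eq_spec]
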